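-- pv_equiv track=rewrite | github.com/RupanugaPM/Chess-app | Chess.py | rotate_matrix_index_full
-- ===== SOURCE A (Python) =====
-- def rotate_matrix_index_full(i, j, rows, cols, times):
--     """
--     Rotate the point (i, j) in a rows×cols matrix by 90° CW 'times' times.
--     Uses an inner helper to do one 90° turn.
--     Returns (final_i, final_j, final_rows, final_cols).
--     """
--     def rotate90(pi, pj, pr, pc):
--         # one 90° clockwise step
--         return pj, pr - 1 - pi, pc, pr
--
--     r = times % 4
--     ci, cj, cr, cc = i, j, rows, cols
--     for _ in range(r):
--         ci, cj, cr, cc = rotate90(ci, cj, cr, cc)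
--     return ci, cj, cr, cc
-- ===== SOURCE B (Python) =====
-- def rotate_matrix_index_full(i, j, rows, cols, times):
--     """Closed-form: one case split on times % 4, no iteration."""
--     r = times % 4
--     if r == 0:
--         return i, j, rows, cols
--     elif r == 1:
--         return j, rows - 1 - i, cols, rows
--     elif r == 2:
--         return rows - 1 - i, cols - 1 - j, rows, cols
--     else:
--         return cols - 1 - j, i, cols, rows
-- ===== Notes on version B (the rewrite author's own statement) =====
-- stated objective: simpler
-- what changed: Replaces the inner rotate90 helper and the loop composing up to three 90-degree steps with a direct closed-form four-case split on times % 4.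
import Mathlib
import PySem

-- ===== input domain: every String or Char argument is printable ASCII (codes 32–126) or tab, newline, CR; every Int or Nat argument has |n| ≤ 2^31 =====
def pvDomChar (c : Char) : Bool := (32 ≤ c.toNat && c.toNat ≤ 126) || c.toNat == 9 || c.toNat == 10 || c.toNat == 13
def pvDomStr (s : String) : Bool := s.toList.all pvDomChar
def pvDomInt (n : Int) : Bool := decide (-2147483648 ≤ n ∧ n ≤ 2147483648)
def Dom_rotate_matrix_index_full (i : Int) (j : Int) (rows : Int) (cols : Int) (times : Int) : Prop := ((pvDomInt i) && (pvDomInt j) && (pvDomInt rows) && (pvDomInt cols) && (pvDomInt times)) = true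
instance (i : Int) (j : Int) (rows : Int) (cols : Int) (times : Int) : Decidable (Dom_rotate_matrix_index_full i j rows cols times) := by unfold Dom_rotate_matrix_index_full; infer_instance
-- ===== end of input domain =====

-- ===== PORT A =====
-- A: r = times % 4, then fold one-step rotate90 over range(r)
def rotate90 (pi : Int) (pj : Int) (pr : Int) (pc : Int) : Int × Int × Int × Int :=
  (pj, pr - 1 - pi, pc, pr)

def rotate_matrix_index_full (i : Int) (j : Int) (rows : Int) (cols : Int) (times : Int) : Int × Int × Int × Int :=
  let r := PySem.Int.mod times 4
  (PySem.List.pyRange 0 r 1).foldl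
    (fun st _ => rotate90 st.1 st.2.1 st.2.2.1 st.2.2.2) (i, j, rows, cols)

-- ===== PORT B =====
-- B (simpler): closed-form case split on times % 4, no iteration
def rotate_matrix_index_full_alt (i : Int) (j : Int) (rows : Int) (cols : Int) (times : Int) : Int × Int × Int × Int :=
  let r := PySem.Int.mod times 4
  if r = 0 then (i, j, rows, cols)
  else if r = 1 then (j, rows - 1 - i, cols, rows)
  else if r = 2 then (rows - 1 - i, cols - 1 - j, rows, cols)
  else (cols - 1 - j, i, cols, rows)

-- ===== PRECONDITION & SPEC =====
def Spec_rotate_matrix_index_full (i : Int) (j : Int) (rows : Int) (cols : Int) (times : Int) (out : Int × Int × Int × Int) : Prop := out = rotate_matrix_index_full_alt i j rows cols times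
instance (i : Int) (j : Int) (rows : Int) (cols : Int) (times : Int) (out : Int × Int × Int × Int) : Decidable (Spec_rotate_matrix_index_full i j rows cols times out) := by unfold Spec_rotate_matrix_index_full; infer_instance

-- ===== CLAIM (what is proved, stated in full; the proofs are below) =====
def Claim_equal_rotate_matrix_index_full : Prop := ∀ (i : Int) (j : Int) (rows : Int) (cols : Int) (times : Int), Dom_rotate_matrix_index_full i j rows cols times → Spec_rotate_matrix_index_full i j rows cols times (rotate_matrix_index_full i j rows cols times)

-- ===== LEMMAS AND PROOFS =====
-- evaluate the tiny ranges range(0), …, range(3)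
theorem pyRange_small :
    PySem.List.pyRange 0 0 1 = ([] : List Int) ∧ PySem.List.pyRange 0 1 1 = [0] ∧
    PySem.List.pyRange 0 2 1 = [0, 1] ∧ PySem.List.pyRange 0 3 1 = [0, 1, 2] := by
  decide

-- ===== VERDICT (by name: the statement is the Claim_ definition above) =====
theorem rotate_matrix_index_full_spec : Claim_equal_rotate_matrix_index_full := by
  intro i j rows cols times _
  unfold Spec_rotate_matrix_index_full rotate_matrix_index_full rotate_matrix_index_full_alt
  have h4 : times % 4 = 0 ∨ times % 4 = 1 ∨ times % 4 = 2 ∨ times % 4 = 3 := by omega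
  rcases h4 with h | h | h | h <;>
    simp [PySem.Int.mod, Int.fmod_eq_emod, h, pyRange_small, List.foldl, rotate90]
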